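-- pv_equiv track=rewrite | github.com/Felisa0852/FeatureCompression | Encoder/intra_premode.py | zig_zaga_scan
-- ===== SOURCE A (Python) =====
-- def zig_zaga_scan(matrix):
--     """Scan matrix of zigzag algorithm"""
--     vector = []
--     location_indicator = ''
--     n = len(matrix) - 1
--
--     i = 0
--     j = 0
--
--     for _ in range(n * 2):
--         vector.append(matrix[i][j])
--         if matrix[i][j] == 0:
--             location_indicator += '0'
--         else:
--             location_indicator += '1'
--
--         if j == n:   # right border
--             i += 1     # shift
--             while i != n:   # diagonal passage
--                 vector.append(matrix[i][j])
--                 if matrix[i][j] == 0: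
--                     location_indicator += '0'
--                 else:
--                     location_indicator += '1'
--
--                 i += 1
--                 j -= 1
--         elif i == 0:  # top border
--             j += 1
--             while j != 0:
--                 vector.append(matrix[i][j])
--                 if matrix[i][j] == 0:
--                     location_indicator += '0'
--                 else:
--                     location_indicator += '1'
--
--                 i += 1
--                 j -= 1
--         elif i == n:   # bottom border
--             j += 1
--             while j != n:
--                 vector.append(matrix[i][j])
--                 if matrix[i][j] == 0:
--                     location_indicator += '0'
--                 else:
--                     location_indicator += '1'
--
--                 i -= 1
--                 j += 1
--         elif j == 0:   # left border
--             i += 1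
--             while i != 0:
--                 vector.append(matrix[i][j])
--                 if matrix[i][j] == 0:
--                     location_indicator += '0'
--                 else:
--                     location_indicator += '1'
--
--                 i -= 1
--                 j += 1
--
--     vector.append(matrix[i][j])
--     if matrix[i][j] == 0:
--         location_indicator += '0'
--     else:
--         location_indicator += '1'
--
--     return vector,location_indicator
-- ===== SOURCE B (Python) =====
-- def zig_zaga_scan(matrix):
--     """Scan matrix of zigzag algorithm (anti-diagonal formulation)."""
--     n = len(matrix) - 1
--     vector = []
--     bits = []
--     for d in range(2 * n + 1):
--         lo = max(0, d - n)
--         hi = min(d, n)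
--         rng = range(lo, hi + 1)
--         if d % 2 == 0:
--             rng = reversed(rng)
--         for i in rng:
--             v = matrix[i][d - i]
--             vector.append(v)
--             bits.append('0' if v == 0 else '1')
--     return vector, ''.join(bits)
-- ===== Notes on version B (the rewrite author's own statement) =====
-- stated objective: simpler
-- what changed: Replaces A's four-branch border state machine with per-element (i,j) stepping by a single loop over anti-diagonals d = i+j, visiting the valid i-range of each diagonal ascending when d is odd and descending when d is even.
import Mathlib
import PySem

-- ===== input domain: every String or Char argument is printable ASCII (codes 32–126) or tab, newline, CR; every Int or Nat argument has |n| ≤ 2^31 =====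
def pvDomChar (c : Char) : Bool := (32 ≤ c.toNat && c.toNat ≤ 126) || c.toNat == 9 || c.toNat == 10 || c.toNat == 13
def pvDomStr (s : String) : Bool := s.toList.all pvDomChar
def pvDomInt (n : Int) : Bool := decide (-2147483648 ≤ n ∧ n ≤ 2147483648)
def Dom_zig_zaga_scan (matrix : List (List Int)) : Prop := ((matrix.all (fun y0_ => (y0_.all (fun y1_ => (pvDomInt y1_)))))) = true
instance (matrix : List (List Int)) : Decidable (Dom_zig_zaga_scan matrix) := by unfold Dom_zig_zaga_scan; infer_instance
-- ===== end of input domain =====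

-- B replaces A's four-branch border state machine by a single loop over anti-diagonals
-- (objective: simpler). Equivalence is proved on nonempty matrices whose rows are long
-- enough (Pre_); elsewhere Python A raises IndexError.


-- ===== PORT A =====
-- matrix[i][j]: exact wherever the indices are in range (guaranteed by Pre_);
-- outside Pre_ the Python raises IndexError (excluded), the port defaults to 0.
def mGet (m : List (List Int)) (i j : Int) : Int :=
  (PySem.List.pyGet? ((PySem.List.pyGet? m i).getD []) j).getD 0

-- vector.append(matrix[i][j]); location_indicator += '0'/'1'  (indicator kept as List Char,
-- turned into a String at the very end)
def visit (m : List (List Int)) (i j : Int) (acc : List Int × List Char) :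
    List Int × List Char :=
  let v := mGet m i j
  (acc.1 ++ [v], acc.2 ++ [if v = 0 then '0' else '1'])

-- while i != n: visit; i += 1; j -= 1   (fuel = exact trip count inside Pre_)
def innRB (m : List (List Int)) (n : Int) : Nat → Int → Int → (List Int × List Char) →
    (List Int × List Char) × Int × Int
  | 0, i, j, acc => (acc, i, j)
  | f+1, i, j, acc =>
    if i = n then (acc, i, j) else innRB m n f (i+1) (j-1) (visit m i j acc)

-- while j != 0: visit; i += 1; j -= 1
def innTop (m : List (List Int)) : Nat → Int → Int → (List Int × List Char) →
    (List Int × List Char) × Int × Int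
  | 0, i, j, acc => (acc, i, j)
  | f+1, i, j, acc =>
    if j = 0 then (acc, i, j) else innTop m f (i+1) (j-1) (visit m i j acc)

-- while j != n: visit; i -= 1; j += 1
def innBot (m : List (List Int)) (n : Int) : Nat → Int → Int → (List Int × List Char) →
    (List Int × List Char) × Int × Int
  | 0, i, j, acc => (acc, i, j)
  | f+1, i, j, acc =>
    if j = n then (acc, i, j) else innBot m n f (i-1) (j+1) (visit m i j acc)

-- while i != 0: visit; i -= 1; j += 1
def innLeft (m : List (List Int)) : Nat → Int → Int → (List Int × List Char) →
    (List Int × List Char) × Int × Int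
  | 0, i, j, acc => (acc, i, j)
  | f+1, i, j, acc =>
    if i = 0 then (acc, i, j) else innLeft m f (i-1) (j+1) (visit m i j acc)

-- one iteration of the for-loop body: visit (i,j), then the border dispatch
def body (m : List (List Int)) (n i j : Int) (acc : List Int × List Char) :
    (List Int × List Char) × Int × Int :=
  let acc := visit m i j acc
  if j = n then innRB m n (n - (i+1)).toNat (i+1) j acc
  else if i = 0 then innTop m (j+1).toNat i (j+1) acc
  else if i = n then innBot m n (n - (j+1)).toNat i (j+1) acc
  else if j = 0 then innLeft m (i+1).toNat (i+1) j acc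
  else (acc, i, j)

-- for _ in range(n * 2): body
def outerA (m : List (List Int)) (n : Int) : Nat → Int → Int → (List Int × List Char) →
    (List Int × List Char) × Int × Int
  | 0, i, j, acc => (acc, i, j)
  | f+1, i, j, acc =>
    let s := body m n i j acc
    outerA m n f s.2.1 s.2.2 s.1

def zig_zaga_scan (matrix : List (List Int)) : List Int × String :=
  let n : Int := matrix.length - 1
  let s := outerA matrix n (n * 2).toNat 0 0 ([], [])
  let r := visit matrix s.2.1 s.2.2 s.1
  (r.1, String.ofList r.2)

-- ===== PORT B =====
-- the i-indices of anti-diagonal d: max(0,d-n)..min(d,n), reversed when d is even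
def diagIs (n d : Int) : List Int :=
  let lo := max 0 (d - n)
  let hi := min d n
  let r := PySem.List.pyRange lo (hi + 1) 1
  if PySem.Int.mod d 2 = 0 then r.reverse else r

def zig_zaga_scan_alt (matrix : List (List Int)) : List Int × String :=
  let n : Int := matrix.length - 1
  let acc := (PySem.List.pyRange 0 (2 * n + 1) 1).foldl
    (fun acc d => (diagIs n d).foldl (fun acc i => visit matrix i (d - i) acc) acc)
    ([], [])
  (acc.1, String.ofList acc.2)

-- ===== PRECONDITION & SPEC =====
-- A raises IndexError on the empty matrix and on matrices with a row shorter than the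
-- matrix height (every cell (i,j), 0 ≤ i,j < height, is read); Pre_ excludes exactly those.
def Pre_zig_zaga_scan (matrix : List (List Int)) : Prop :=
  matrix ≠ [] ∧ ∀ row ∈ matrix, (matrix.length : Int) ≤ (row.length : Int)
instance (matrix : List (List Int)) : Decidable (Pre_zig_zaga_scan matrix) := by
  unfold Pre_zig_zaga_scan; infer_instance

def pvWitness_zig_zaga_scan : List (List Int) := [[1, 0], [2, 3]]

def Spec_zig_zaga_scan (matrix : List (List Int)) (out : List Int × String) : Prop :=
  out = zig_zaga_scan_alt matrix
instance (matrix : List (List Int)) (out : List Int × String) :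
    Decidable (Spec_zig_zaga_scan matrix out) := by unfold Spec_zig_zaga_scan; infer_instance

-- ===== CLAIM (what is proved, stated in full; the proofs are below) =====
def Claim_equal_zig_zaga_scan : Prop := ∀ (matrix : List (List Int)),
  Dom_zig_zaga_scan matrix → Pre_zig_zaga_scan matrix →
  Spec_zig_zaga_scan matrix (zig_zaga_scan matrix)

-- ===== LEMMAS AND PROOFS =====

-- emission of a list of cells
def emitC (m : List (List Int)) (cells : List (Int × Int)) (acc : List Int × List Char) :
    List Int × List Char :=
  cells.foldl (fun a c => visit m c.1 c.2 a) acc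

-- anti-diagonal d as (i,j) cells, in B's visiting order
def diagC (n d : Int) : List (Int × Int) := (diagIs n d).map (fun i => (i, d - i))

-- the cell A's trajectory occupies when it is about to start outer iteration 2n-d
def lastC (n d : Int) : Int × Int :=
  if d % 2 = 0 then (max 0 (d - n), d - max 0 (d - n)) else (min d n, d - min d n)

-- all cells of diagonals d..2n in B's order
def sfrom (n d : Int) : List (Int × Int) :=
  (PySem.List.pyRange d (2 * n + 1) 1).flatMap (diagC n)

theorem emitC_cons (m : List (List Int)) (c : Int × Int) (cs : List (Int × Int))
    (acc : List Int × List Char) :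
    emitC m (c :: cs) acc = emitC m cs (visit m c.1 c.2 acc) := rfl

theorem emitC_append (m : List (List Int)) (xs ys : List (Int × Int))
    (acc : List Int × List Char) :
    emitC m (xs ++ ys) acc = emitC m ys (emitC m xs acc) := List.foldl_append

theorem rev_range (k : Nat) : (List.range k).reverse = (List.range k).map (fun t => k - 1 - t) := by
  induction k with
  | zero => simp
  | succ k ih =>
    nth_rewrite 1 [List.range_succ]
    rw [List.reverse_append, List.range_succ_eq_map (n := k)]
    simp [ih, List.map_map, Function.comp_def]
    omega


theorem diagC_odd_small (n e : Int) (hn : 0 ≤ n) (hp : e % 2 = 1) (h1 : 0 ≤ e) (h2 : e ≤ n) :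
    diagC n e = (List.range (e+1).toNat).map (fun (t : Nat) => ((t : Int), e - (t : Int))) := by
  have hlo : max 0 (e - n) = 0 := by omega
  have hhi : min e n = e := by omega
  have hm : PySem.Int.mod e 2 = 1 := by
    rw [PySem.Int.mod_eq_emod_of_pos (by omega)]; exact hp
  simp only [diagC, diagIs, hlo, hhi, hm]
  rw [if_neg (by norm_num), PySem.List.pyRange_one, List.map_map]
  have h0 : (e + 1 - 0).toNat = (e+1).toNat := by omega
  rw [h0]
  apply List.map_congr_left
  intro t ht; simp

theorem diagC_odd_big (n e : Int) (hp : e % 2 = 1) (h1 : n < e) (h2 : e ≤ 2*n) :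
    diagC n e = (List.range (2*n - e + 1).toNat).map (fun (t : Nat) => (e - n + (t : Int), n - (t : Int))) := by
  have hlo : max 0 (e - n) = e - n := by omega
  have hhi : min e n = n := by omega
  have hm : PySem.Int.mod e 2 = 1 := by
    rw [PySem.Int.mod_eq_emod_of_pos (by omega)]; exact hp
  simp only [diagC, diagIs, hlo, hhi, hm]
  rw [if_neg (by norm_num), PySem.List.pyRange_one, List.map_map]
  have hk : (n + 1 - (e - n)).toNat = (2*n - e + 1).toNat := by omega
  rw [hk]
  apply List.map_congr_left
  intro t ht; simp; ring

theorem diagC_even_small (n e : Int) (hn : 0 ≤ n) (hp : e % 2 = 0) (h1 : 0 ≤ e) (h2 : e ≤ n) :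
    diagC n e = (List.range (e+1).toNat).map (fun (t : Nat) => (e - (t : Int), (t : Int))) := by
  have hlo : max 0 (e - n) = 0 := by omega
  have hhi : min e n = e := by omega
  have hm : PySem.Int.mod e 2 = 0 := by
    rw [PySem.Int.mod_eq_emod_of_pos (by omega)]; exact hp
  simp only [diagC, diagIs, hlo, hhi, hm]
  rw [if_pos trivial, PySem.List.pyRange_one, ← List.map_reverse, rev_range, List.map_map,
    List.map_map]
  have h0 : (e + 1 - 0).toNat = (e+1).toNat := by omega
  rw [h0]
  apply List.map_congr_left
  intro t ht
  simp only [List.mem_range] at ht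
  simp only [Function.comp, Prod.ext_iff]
  constructor <;> omega

theorem diagC_even_big (n e : Int) (hp : e % 2 = 0) (h1 : n ≤ e) (h2 : e ≤ 2*n) :
    diagC n e = (List.range (2*n - e + 1).toNat).map (fun (t : Nat) => (n - (t : Int), e - n + (t : Int))) := by
  have hn : 0 ≤ n := by omega
  have hlo : max 0 (e - n) = e - n := by omega
  have hhi : min e n = n := by omega
  have hm : PySem.Int.mod e 2 = 0 := by
    rw [PySem.Int.mod_eq_emod_of_pos (by omega)]; exact hp
  simp only [diagC, diagIs, hlo, hhi, hm]
  rw [if_pos trivial, PySem.List.pyRange_one, ← List.map_reverse, rev_range, List.map_map,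
    List.map_map]
  have hk : (n + 1 - (e - n)).toNat = (2*n - e + 1).toNat := by omega
  rw [hk]
  apply List.map_congr_left
  intro t ht
  simp only [List.mem_range] at ht
  simp only [Function.comp, Prod.ext_iff]
  constructor <;> omega

theorem innTop_spec (m : List (List Int)) : ∀ (c : Nat) (i : Int) (acc : List Int × List Char),
    innTop m c i (c : Int) acc
      = (emitC m ((List.range c).map (fun (t : Nat) => (i + (t : Int), (c : Int) - (t : Int)))) acc,
         i + c, 0) := by
  intro c
  induction c with
  | zero => intro i acc; simp [innTop, emitC]
  | succ c ih =>
    intro i acc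
    simp only [innTop]
    rw [if_neg (by omega)]
    have h1 : ((c+1 : Nat) : Int) - 1 = (c : Int) := by omega
    rw [h1, ih]
    rw [List.range_succ_eq_map, List.map_cons, List.map_map]
    simp only [emitC, List.foldl_cons]
    have h2 : (fun (t : Nat) => (i + 1 + (t : Int), (c : Int) - t))
        = ((fun (t : Nat) => (i + (t : Int), ((c+1 : Nat) : Int) - t)) ∘ Nat.succ) := by
      funext t; simp [Function.comp, Prod.ext_iff]; omega
    have h3 : visit m (i + ((0 : Nat) : Int)) (((c+1 : Nat) : Int) - ((0 : Nat) : Int)) acc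
        = visit m i ((c+1 : Nat) : Int) acc := by norm_num
    simp only [Prod.mk.injEq]
    refine ⟨by rw [h2, h3], by omega, trivial⟩
theorem innRB_spec (m : List (List Int)) (n : Int) :
    ∀ (c : Nat) (j : Int) (acc : List Int × List Char),
    innRB m n c (n - (c : Int)) j acc
      = (emitC m ((List.range c).map (fun (t : Nat) => (n - (c : Int) + (t : Int), j - (t : Int)))) acc,
         n, j - c) := by
  intro c
  induction c with
  | zero => intro j acc; simp [innRB, emitC]
  | succ c ih =>
    intro j acc
    simp only [innRB]
    rw [if_neg (by omega)]
    have h1 : n - ((c+1 : Nat) : Int) + 1 = n - (c : Int) := by omega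
    rw [h1, ih]
    rw [List.range_succ_eq_map, List.map_cons, List.map_map]
    simp only [emitC, List.foldl_cons]
    have h2 : (fun (t : Nat) => (n - (c : Int) + (t : Int), j - 1 - t))
        = ((fun (t : Nat) => (n - ((c+1 : Nat) : Int) + (t : Int), j - t)) ∘ Nat.succ) := by
      funext t; simp [Function.comp, Prod.ext_iff]; omega
    have h3 : visit m (n - ((c+1 : Nat) : Int) + ((0 : Nat) : Int)) (j - ((0 : Nat) : Int)) acc
        = visit m (n - ((c+1 : Nat) : Int)) j acc := by norm_num
    simp only [Prod.mk.injEq]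
    refine ⟨by rw [h2, h3], trivial, by omega⟩

theorem innBot_spec (m : List (List Int)) (n : Int) :
    ∀ (c : Nat) (i : Int) (acc : List Int × List Char),
    innBot m n c i (n - (c : Int)) acc
      = (emitC m ((List.range c).map (fun (t : Nat) => (i - (t : Int), n - (c : Int) + (t : Int)))) acc,
         i - c, n) := by
  intro c
  induction c with
  | zero => intro i acc; simp [innBot, emitC]
  | succ c ih =>
    intro i acc
    simp only [innBot]
    rw [if_neg (by omega)]
    have h1 : n - ((c+1 : Nat) : Int) + 1 = n - (c : Int) := by omega
    rw [h1, ih]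
    rw [List.range_succ_eq_map, List.map_cons, List.map_map]
    simp only [emitC, List.foldl_cons]
    have h2 : (fun (t : Nat) => (i - 1 - (t : Int), n - (c : Int) + t))
        = ((fun (t : Nat) => (i - (t : Int), n - ((c+1 : Nat) : Int) + t)) ∘ Nat.succ) := by
      funext t; simp [Function.comp, Prod.ext_iff]; omega
    have h3 : visit m (i - ((0 : Nat) : Int)) (n - ((c+1 : Nat) : Int) + ((0 : Nat) : Int)) acc
        = visit m i (n - ((c+1 : Nat) : Int)) acc := by norm_num
    simp only [Prod.mk.injEq]
    refine ⟨by rw [h2, h3], by omega, trivial⟩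

theorem innLeft_spec (m : List (List Int)) :
    ∀ (c : Nat) (j : Int) (acc : List Int × List Char),
    innLeft m c (c : Int) j acc
      = (emitC m ((List.range c).map (fun (t : Nat) => ((c : Int) - (t : Int), j + (t : Int)))) acc,
         0, j + c) := by
  intro c
  induction c with
  | zero => intro j acc; simp [innLeft, emitC]
  | succ c ih =>
    intro j acc
    simp only [innLeft]
    rw [if_neg (by omega)]
    have h1 : ((c+1 : Nat) : Int) - 1 = (c : Int) := by omega
    rw [h1, ih]
    rw [List.range_succ_eq_map, List.map_cons, List.map_map]
    simp only [emitC, List.foldl_cons]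
    have h2 : (fun (t : Nat) => ((c : Int) - (t : Int), j + 1 + t))
        = ((fun (t : Nat) => (((c+1 : Nat) : Int) - (t : Int), j + t)) ∘ Nat.succ) := by
      funext t; simp [Function.comp, Prod.ext_iff]; omega
    have h3 : visit m (((c+1 : Nat) : Int) - ((0 : Nat) : Int)) (j + ((0 : Nat) : Int)) acc
        = visit m ((c+1 : Nat) : Int) j acc := by norm_num
    simp only [Prod.mk.injEq]
    refine ⟨by rw [h2, h3], trivial, by omega⟩

theorem dropLast_map_range {α : Type} (k : Nat) (f : Nat → α) :
    ((List.range (k+1)).map f).dropLast = (List.range k).map f := by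
  rw [List.range_succ, List.map_append]; simp


-- inner-loop characterisations
-- one outer iteration, started at A's trajectory point of diagonal d, emits the last
-- cell of diagonal d followed by all of diagonal d+1 except its last cell, and stops
-- at the trajectory point of diagonal d+1
theorem body_step (m : List (List Int)) (n d : Int) (hn : 0 ≤ n) (h0 : 0 ≤ d)
    (h2 : d < 2*n) (acc : List Int × List Char) :
    body m n (lastC n d).1 (lastC n d).2 acc
      = (emitC m (diagC n (d+1)).dropLast (visit m (lastC n d).1 (lastC n d).2 acc),
         (lastC n (d+1)).1, (lastC n (d+1)).2) := by
  by_cases hp : d % 2 = 0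
  · by_cases hlt : d < n
    · -- even d, top half: top-border branch, diagonal d+1 is odd and small
      have hL : lastC n d = (0, d) := by
        simp only [lastC, if_pos hp, Prod.mk.injEq]; constructor <;> omega
      have hL' : lastC n (d+1) = (d+1, 0) := by
        simp only [lastC, if_neg (by omega : ¬ (d+1) % 2 = 0), Prod.mk.injEq]
        constructor <;> omega
      rw [hL, hL']
      simp only [body]
      rw [if_neg (by omega : ¬ d = n), if_pos trivial]
      have hc : (((d+1).toNat : Nat) : Int) = d + 1 := by omega
      have hsp := innTop_spec m (d+1).toNat 0 (visit m 0 d acc)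
      rw [hc] at hsp
      rw [hsp, diagC_odd_small n (d+1) hn (by omega) (by omega) (by omega)]
      have hk : (d+1+1).toNat = (d+1).toNat + 1 := by omega
      rw [hk, dropLast_map_range]
      simp only [Prod.mk.injEq]
      refine ⟨?_, by omega, trivial⟩
      congr 1
      apply List.map_congr_left
      intro t ht; simp [Prod.ext_iff]
    · -- even d, bottom half: right-border branch, diagonal d+1 is odd and big
      have hL : lastC n d = (d - n, n) := by
        simp only [lastC, if_pos hp, Prod.mk.injEq]; constructor <;> omega
      have hL' : lastC n (d+1) = (n, d+1-n) := by
        simp only [lastC, if_neg (by omega : ¬ (d+1) % 2 = 0), Prod.mk.injEq]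
        constructor <;> omega
      rw [hL, hL']
      simp only [body]
      rw [if_pos trivial]
      have hc : n - (((n - (d - n + 1)).toNat : Nat) : Int) = d - n + 1 := by omega
      have hsp := innRB_spec m n (n - (d - n + 1)).toNat n (visit m (d - n) n acc)
      rw [hc] at hsp
      rw [hsp, diagC_odd_big n (d+1) (by omega) (by omega) (by omega)]
      have hk : (2*n - (d+1) + 1).toNat = (n - (d - n + 1)).toNat + 1 := by omega
      rw [hk, dropLast_map_range]
      simp only [Prod.mk.injEq]
      refine ⟨?_, trivial, by omega⟩
      congr 1
      apply List.map_congr_left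
      intro t ht; simp [Prod.ext_iff]; omega
  · by_cases hlt : d < n
    · -- odd d, top half: left-border branch, diagonal d+1 is even and small
      have hL : lastC n d = (d, 0) := by
        simp only [lastC, if_neg hp, Prod.mk.injEq]; constructor <;> omega
      have hL' : lastC n (d+1) = (0, d+1) := by
        simp only [lastC, if_pos (by omega : (d+1) % 2 = 0), Prod.mk.injEq]
        constructor <;> omega
      rw [hL, hL']
      simp only [body]
      rw [if_neg (by omega : ¬ (0:Int) = n), if_neg (by omega : ¬ d = 0),
        if_neg (by omega : ¬ d = n), if_pos trivial]
      have hc : (((d+1).toNat : Nat) : Int) = d + 1 := by omega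
      have hsp := innLeft_spec m (d+1).toNat 0 (visit m d 0 acc)
      rw [hc] at hsp
      rw [hsp, diagC_even_small n (d+1) hn (by omega) (by omega) (by omega)]
      have hk : (d+1+1).toNat = (d+1).toNat + 1 := by omega
      rw [hk, dropLast_map_range]
      simp only [Prod.mk.injEq]
      refine ⟨?_, trivial, by omega⟩
      congr 1
      apply List.map_congr_left
      intro t ht; simp [Prod.ext_iff]
    · -- odd d, bottom half: bottom-border branch, diagonal d+1 is even and big
      have hL : lastC n d = (n, d - n) := by
        simp only [lastC, if_neg hp, Prod.mk.injEq]; constructor <;> omega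
      have hL' : lastC n (d+1) = (d+1-n, n) := by
        simp only [lastC, if_pos (by omega : (d+1) % 2 = 0), Prod.mk.injEq]
        constructor <;> omega
      rw [hL, hL']
      simp only [body]
      rw [if_neg (by omega : ¬ d - n = n), if_neg (by omega : ¬ n = 0), if_pos trivial]
      have hc : n - (((n - (d - n + 1)).toNat : Nat) : Int) = d - n + 1 := by omega
      have hsp := innBot_spec m n (n - (d - n + 1)).toNat n (visit m n (d - n) acc)
      rw [hc] at hsp
      rw [hsp, diagC_even_big n (d+1) (by omega) (by omega) (by omega)]
      have hk : (2*n - (d+1) + 1).toNat = (n - (d - n + 1)).toNat + 1 := by omega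
      rw [hk, dropLast_map_range]
      simp only [Prod.mk.injEq]
      refine ⟨?_, by omega, trivial⟩
      congr 1
      apply List.map_congr_left
      intro t ht; simp [Prod.ext_iff]; omega

theorem sfrom_cons (n d : Int) (h0 : 0 ≤ d) (h2 : d ≤ 2*n) :
    sfrom n d = diagC n d ++ sfrom n (d+1) := by
  unfold sfrom
  rw [PySem.List.pyRange_one_cons (by omega), List.flatMap_cons]

theorem diag_decomp (n e : Int) (hn : 0 ≤ n) (h0 : 0 ≤ e) (h2 : e ≤ 2*n) :
    diagC n e = (diagC n e).dropLast ++ [lastC n e] := by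
  have key : ∀ {α : Type} (K : Nat) (f : Nat → α) (x : α), f K = x →
      (List.range (K+1)).map f = ((List.range (K+1)).map f).dropLast ++ [x] := by
    intro α K f x hx
    rw [dropLast_map_range, List.range_succ, List.map_append, List.map_singleton, hx]
  by_cases hp : e % 2 = 0
  · by_cases hlt : e ≤ n
    · rw [diagC_even_small n e hn hp h0 hlt, show (e+1).toNat = e.toNat + 1 by omega]
      apply key
      simp only [lastC, if_pos hp, Prod.mk.injEq]; constructor <;> omega
    · rw [diagC_even_big n e hp (by omega) h2,
        show (2*n-e+1).toNat = (2*n-e).toNat + 1 by omega]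
      apply key
      simp only [lastC, if_pos hp, Prod.mk.injEq]; constructor <;> omega
  · by_cases hlt : e ≤ n
    · rw [diagC_odd_small n e hn (by omega) h0 hlt, show (e+1).toNat = e.toNat + 1 by omega]
      apply key
      simp only [lastC, if_neg hp, Prod.mk.injEq]; constructor <;> omega
    · rw [diagC_odd_big n e (by omega) (by omega) h2,
        show (2*n-e+1).toNat = (2*n-e).toNat + 1 by omega]
      apply key
      simp only [lastC, if_neg hp, Prod.mk.injEq]; constructor <;> omega

-- the main invariant: running the remaining f outer iterations from the trajectory
-- point of diagonal 2n-f and then doing the final visit emits exactly the cells of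
-- diagonals 2n-f .. 2n starting at that trajectory point
theorem run_from (m : List (List Int)) (n : Int) (hn : 0 ≤ n) :
    ∀ (f : Nat), (f : Int) ≤ 2*n → ∀ (acc : List Int × List Char),
    (let s := outerA m n f (lastC n (2*n - f)).1 (lastC n (2*n - f)).2 acc;
     visit m s.2.1 s.2.2 s.1)
      = emitC m (lastC n (2*n - f) :: sfrom n (2*n - f + 1)) acc := by
  intro f
  induction f with
  | zero =>
    intro hf acc
    simp only [outerA, Nat.cast_zero]
    have h1 : sfrom n (2*n - 0 + 1) = [] := by
      unfold sfrom
      rw [PySem.List.pyRange_one_eq_nil (by omega)]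
      rfl
    rw [h1, emitC_cons]
    rfl
  | succ f ih =>
    intro hf acc
    have hd0 : (0:Int) ≤ 2*n - (f+1 : Nat) := by omega
    have hd2 : 2*n - ((f+1 : Nat) : Int) < 2*n := by
      have : (0:Int) < ((f+1 : Nat) : Int) := by omega
      omega
    simp only [outerA]
    rw [body_step m n (2*n - ((f+1 : Nat) : Int)) hn hd0 hd2 acc]
    have harg : 2*n - ((f : Nat) : Int) = 2*n - ((f+1 : Nat) : Int) + 1 := by omega
    have IH := ih (by omega) (emitC m (diagC n (2*n - ((f+1 : Nat) : Int) + 1)).dropLast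
      (visit m (lastC n (2*n - ((f+1 : Nat) : Int))).1
        (lastC n (2*n - ((f+1 : Nat) : Int))).2 acc))
    rw [harg] at IH
    simp only at IH ⊢
    rw [IH, emitC_cons, emitC_cons]
    conv_rhs => rw [sfrom_cons n (2*n - ((f+1 : Nat) : Int) + 1) (by omega) (by omega),
      diag_decomp n (2*n - ((f+1 : Nat) : Int) + 1) hn (by omega) (by omega),
      List.append_assoc, emitC_append, emitC_append]
    rfl

theorem alt_eq_emit (m : List (List Int)) :
    zig_zaga_scan_alt m
      = (let p := emitC m (sfrom (m.length - 1) 0) ([], []); (p.1, String.ofList p.2)) := by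
  have key : ∀ (n : Int) (ds : List Int) (acc : List Int × List Char),
      ds.foldl (fun acc d => (diagIs n d).foldl (fun acc i => visit m i (d - i) acc) acc) acc
        = emitC m (ds.flatMap (diagC n)) acc := by
    intro n ds
    induction ds with
    | nil => intro acc; rfl
    | cons d ds ih =>
      intro acc
      rw [List.foldl_cons, List.flatMap_cons, emitC_append, ih]
      congr 1
      unfold diagC emitC
      rw [List.foldl_map]
  simp only [zig_zaga_scan_alt, sfrom]
  rw [key]

theorem ports_agree (m : List (List Int)) (hm : m ≠ []) :
    zig_zaga_scan m = zig_zaga_scan_alt m := by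
  have hlen : 1 ≤ m.length := List.length_pos_iff.mpr hm
  set n : Int := (m.length : Int) - 1 with hn
  have hn0 : 0 ≤ n := by omega
  have hf : ((n*2).toNat : Int) = 2*n := by omega
  have h0 : lastC n (2*n - ((n*2).toNat : Int)) = (0, 0) := by
    rw [hf]
    simp only [lastC, if_pos (by omega : (2*n - 2*n) % 2 = 0), Prod.mk.injEq]
    constructor <;> omega
  have hrun := run_from m n hn0 (n*2).toNat (by omega) ([], [])
  rw [h0] at hrun
  have hdiag0 : diagC n 0 = [(0, 0)] := by
    rw [diagC_even_small n 0 hn0 (by omega) (by omega) (by omega)]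
    rfl
  have hs0 : sfrom n 0 = (0, 0) :: sfrom n 1 := by
    rw [sfrom_cons n 0 (by omega) (by omega), hdiag0]
    rfl
  rw [alt_eq_emit, hs0]
  simp only [zig_zaga_scan, ← hn]
  simp only at hrun
  rw [hf] at hrun
  rw [show 2*n - 2*n + 1 = (1:Int) by omega] at hrun
  rw [hrun]

-- ===== VERDICT (by name: the statement is the Claim_ definition above) =====
theorem zig_zaga_scan_spec : Claim_equal_zig_zaga_scan := by
  intro matrix _ hpre
  exact ports_agree matrix hpre.1
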